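-- pv_equiv track=rewrite | github.com/hailingfang/biobrary | biobrary/bioparse/gbk_parse.py | _split_locus_anno_info
-- ===== SOURCE A (Python) =====
-- def _split_locus_anno_info(data_lines):
--     data_blocks = {}
--     tmp = []
--     block = []
--     for l in data_lines:
--         if len(l) == 0:
--             continue
--         if l[0] != " ":
--             tmp.append(block)
--             block = []
--         block.append(l)
--     tmp.append(block)
--     tmp = tmp[1:]
--
--     for block in tmp:
--         block_type = block[0].split()[0]
--         if block_type not in data_blocks:
--             data_blocks[block_type] = [block]
--         else:
--             data_blocks[block_type].append(block)
--     return data_blocks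
-- ===== SOURCE B (Python) =====
-- def _split_locus_anno_info(data_lines):
--     # One linear scan instead of two passes: the dict is built while scanning;
--     # `started` drops everything before the first block-starting line, as A's tmp[1:] does.
--     data_blocks = {}
--     block = []
--     started = False
--     for l in data_lines:
--         if not l:
--             continue
--         if l[0] != " ":
--             if started:
--                 data_blocks.setdefault(block[0].split()[0], []).append(block)
--             started = True
--             block = []
--         block.append(l)
--     if started:
--         data_blocks.setdefault(block[0].split()[0], []).append(block)
--     return data_blocks
-- ===== Notes on version B (the rewrite author's own statement) =====
-- stated objective: simpler
-- what changed: B replaces A's two passes (first build a list of blocks and drop its sentinel head, then group the blocks into the dict) with a single linear scan that flushes each finished block straight into the dict via setdefault, using a started flag instead of the dropped sentinel entry.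
import Mathlib
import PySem

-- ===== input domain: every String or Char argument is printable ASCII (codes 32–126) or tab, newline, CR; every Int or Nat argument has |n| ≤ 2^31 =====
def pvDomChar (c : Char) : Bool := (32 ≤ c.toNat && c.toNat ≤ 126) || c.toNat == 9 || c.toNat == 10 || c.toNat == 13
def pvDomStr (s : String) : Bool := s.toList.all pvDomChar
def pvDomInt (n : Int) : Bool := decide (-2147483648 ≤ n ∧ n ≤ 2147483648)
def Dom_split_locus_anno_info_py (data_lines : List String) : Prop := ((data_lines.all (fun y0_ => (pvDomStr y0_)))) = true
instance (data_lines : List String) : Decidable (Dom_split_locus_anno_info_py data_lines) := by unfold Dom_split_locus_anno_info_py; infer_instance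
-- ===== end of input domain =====

-- B fuses A's two passes into one linear scan that builds the dict while scanning (simpler: no intermediate list of blocks).

-- ===== PORT A =====
-- block[0].split()[0]; both lookups are `some` on every input Pre_ admits (none = IndexError, excluded by Pre_)
def pvBlockType (block : List String) : String :=
  ((PySem.Str.split₀ ((PySem.List.pyGet? block 0).getD "")).headD "")

-- body of A's first loop: state (tmp, block)
def pvStepA (st : List (List String) × List String) (l : String) :
    List (List String) × List String :=
  if PySem.Str.len l = 0 then st
  else
    let st' := if PySem.Str.pyGet? l 0 ≠ some ' ' then (st.1 ++ [st.2], ([] : List String)) else st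
    (st'.1, st'.2 ++ [l])

-- body of A's second loop: file the block under its type
def pvGStep (db : PySem.Dict String (List (List String))) (block : List String) :
    PySem.Dict String (List (List String)) :=
  let bt := pvBlockType block
  if db.contains bt = false then db.insert bt [block]
  else db.modify bt [] (· ++ [block])

def split_locus_anno_info_py (data_lines : List String) : List (String × List (List String)) :=
  let s := data_lines.foldl pvStepA ([], [])
  let tmp := PySem.List.slice (s.1 ++ [s.2]) (some 1) none   -- tmp.append(block); tmp = tmp[1:]
  (tmp.foldl pvGStep PySem.Dict.empty).items

-- ===== PORT B =====
-- data_blocks.setdefault(block[0].split()[0], []).append(block)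
def pvFlush (db : PySem.Dict String (List (List String))) (block : List String) :
    PySem.Dict String (List (List String)) :=
  let bt := pvBlockType block
  let db := db.setdefault bt []
  db.modify bt [] (· ++ [block])

-- body of B's single loop: state (data_blocks, block, started)
def pvStepB (st : PySem.Dict String (List (List String)) × List String × Bool) (l : String) :
    PySem.Dict String (List (List String)) × List String × Bool :=
  if PySem.Str.len l = 0 then st
  else if PySem.Str.pyGet? l 0 ≠ some ' ' then
    ((if st.2.2 then pvFlush st.1 st.2.1 else st.1), [l], true)
  else (st.1, st.2.1 ++ [l], st.2.2)

def split_locus_anno_info_py_alt (data_lines : List String) : List (String × List (List String)) :=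
  let s := data_lines.foldl pvStepB (PySem.Dict.empty, [], false)
  (if s.2.2 then pvFlush s.1 s.2.1 else s.1).items

-- ===== PRECONDITION & SPEC =====
-- Pre_ excludes exactly the inputs on which A raises IndexError: a nonempty line that starts
-- a block (first char not ' ') but contains no non-whitespace token, so block[0].split()[0] fails.
def Pre_split_locus_anno_info_py (data_lines : List String) : Prop :=
  ∀ l ∈ data_lines, l ≠ "" → PySem.Str.pyGet? l 0 ≠ some ' ' → PySem.Str.split₀ l ≠ []
instance (data_lines : List String) : Decidable (Pre_split_locus_anno_info_py data_lines) := by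
  unfold Pre_split_locus_anno_info_py; infer_instance

def pvWitness_split_locus_anno_info_py : List String :=
  ["  leading", "LOCUS  AB1", "  cont line", "FEATURES", "LOCUS  CD2"]

def Spec_split_locus_anno_info_py (data_lines : List String) (out : List (String × List (List String))) : Prop := out = split_locus_anno_info_py_alt data_lines
instance (data_lines : List String) (out : List (String × List (List String))) : Decidable (Spec_split_locus_anno_info_py data_lines out) := by unfold Spec_split_locus_anno_info_py; infer_instance

-- ===== CLAIM (what is proved, stated in full; the proofs are below) =====
def Claim_equal_split_locus_anno_info_py : Prop := ∀ (data_lines : List String), Dom_split_locus_anno_info_py data_lines → Pre_split_locus_anno_info_py data_lines → Spec_split_locus_anno_info_py data_lines (split_locus_anno_info_py data_lines)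

-- ===== LEMMAS AND PROOFS =====

-- B's setdefault-then-append flush equals A's contains-branch group step.
theorem pvFlush_eq_gstep (db : PySem.Dict String (List (List String))) (block : List String) :
    pvFlush db block = pvGStep db block := by
  simp only [pvFlush, pvGStep]
  by_cases h : db.contains (pvBlockType block) = true
  · rw [PySem.Dict.setdefault_of_contains _ _ h]; simp [h]
  · have h' : db.contains (pvBlockType block) = false := by simpa using h
    rw [PySem.Dict.setdefault_of_not_contains _ _ h']
    simp [h', PySem.Dict.modify, PySem.Dict.insert_insert_self, PySem.Dict.getD_insert_self]

-- loop invariant: after any prefix of lines, B's state is determined by A's state: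
-- same current block, started ↔ A has flushed something into tmp, and B's dict is A's
-- second loop run over tmp without its first (dropped) entry.
theorem pvInv (lines : List String) :
    ∀ (tmp : List (List String)) (block : List String)
      (db : PySem.Dict String (List (List String))) (started : Bool),
      (started = true ↔ tmp ≠ []) →
      db = (tmp.tail).foldl pvGStep PySem.Dict.empty →
      (lines.foldl pvStepB (db, block, started)).1
          = ((lines.foldl pvStepA (tmp, block)).1.tail).foldl pvGStep PySem.Dict.empty
        ∧ (lines.foldl pvStepB (db, block, started)).2.1 = (lines.foldl pvStepA (tmp, block)).2
        ∧ ((lines.foldl pvStepB (db, block, started)).2.2 = true ↔ (lines.foldl pvStepA (tmp, block)).1 ≠ []) := by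
  induction lines with
  | nil => intro tmp block db started hst hdb; exact ⟨hdb, rfl, hst⟩
  | cons l ls ih =>
    intro tmp block db started hst hdb
    have hl0 : (l = "") ∨ l ≠ "" := by tauto
    simp only [List.foldl_cons]
    by_cases hl : l = ""
    · have hA : pvStepA (tmp, block) l = (tmp, block) := by simp [pvStepA, hl]
      have hB : pvStepB (db, block, started) l = (db, block, started) := by simp [pvStepB, hl]
      rw [hA, hB]
      exact ih tmp block db started hst hdb
    · by_cases hsp : PySem.List.pyGet? l.toList 0 = some ' '
      · have hA : pvStepA (tmp, block) l = (tmp, block ++ [l]) := by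
          simp [pvStepA, hl, hsp]
        have hB : pvStepB (db, block, started) l = (db, block ++ [l], started) := by
          simp [pvStepB, hl, hsp]
        rw [hA, hB]
        exact ih tmp (block ++ [l]) db started hst hdb
      · have hA : pvStepA (tmp, block) l = (tmp ++ [block], [l]) := by
          simp [pvStepA, hl, hsp]
        have hB : pvStepB (db, block, started) l
            = ((if started then pvFlush db block else db), [l], true) := by
          simp [pvStepB, hl, hsp]
        rw [hA, hB]
        apply ih
        · simp
        · cases tmp with
          | nil =>
            have : started = false := by
              cases started with
              | false => rfl
              | true => exact absurd (hst.mp rfl) (by simp)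
            subst this
            simpa using hdb
          | cons t ts =>
            have : started = true := hst.mpr (by simp)
            subst this
            simp only [List.tail_cons] at hdb
            rw [if_pos rfl, pvFlush_eq_gstep, hdb]
            simp [List.foldl_append]

-- ===== VERDICT (by name: the statement is the Claim_ definition above) =====
theorem split_locus_anno_info_py_spec : Claim_equal_split_locus_anno_info_py := by
  intro data_lines _ _
  unfold Spec_split_locus_anno_info_py
  simp only [split_locus_anno_info_py, split_locus_anno_info_py_alt]
  obtain ⟨h1, h2, h3⟩ := pvInv data_lines [] [] PySem.Dict.empty false (by simp) (by simp)
  rw [PySem.List.slice_from_one]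
  cases hA : (data_lines.foldl pvStepA ([], [])).1 with
  | nil =>
    have hb : (data_lines.foldl pvStepB (PySem.Dict.empty, [], false)).2.2 = false := by
      cases hb : (data_lines.foldl pvStepB (PySem.Dict.empty, [], false)).2.2 with
      | false => rfl
      | true => exact absurd (h3.mp hb) (by simp [hA])
    rw [h1, hA] at *
    simp [hb]
  | cons t ts =>
    have hb : (data_lines.foldl pvStepB (PySem.Dict.empty, [], false)).2.2 = true := by
      apply h3.mpr; simp [hA]
    rw [hA] at h1
    simp only [List.tail_cons] at h1
    simp only [hb, if_true]
    rw [h2, pvFlush_eq_gstep, h1]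
    simp [List.foldl_append]
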